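-- pv_equiv track=rewrite | github.com/facebook/pyre-check | scripts/pysa_fuzzer/example.py | f36
-- ===== SOURCE A (Python) =====
-- def f36(x, levels):
--     # Zigzag pattern decoding
--     if levels <= 1 or levels >= len(x):
--         return x
--     pattern = [0] * len(x)
--     level = 0
--     direction = 1
--     for i in range(len(x)):
--         pattern[i] = level
--         level += direction
--         if level == 0 or level == levels - 1:
--             direction *= -1
--     decoded = [''] * len(x)
--     index = 0
--     for l in range(levels):
--         for i in range(len(x)):
--             if pattern[i] == l:
--                 decoded[i] = x[index]
--                 index += 1
--     return ''.join(decoded)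
-- ===== SOURCE B (Python) =====
-- def f36(x, levels):
--     n = len(x)
--     if levels <= 1 or levels >= n:
--         return x
--     # closed-form level of position i: period p = 2*(levels-1)
--     p = 2 * (levels - 1)
--     buckets = [[] for _ in range(levels)]
--     for i in range(n):
--         r = i % p
--         buckets[r if r < levels else p - r].append(i)
--     order = [i for b in buckets for i in b]
--     decoded = [''] * n
--     for pos, c in zip(order, x):
--         decoded[pos] = c
--     return ''.join(decoded)
-- ===== Notes on version B (the rewrite author's own statement) =====
-- stated objective: faster
-- what changed: Replaces A's level-state simulation and its levels-many full rescans of the pattern array by a closed-form level formula (period 2*(levels-1)) that buckets positions by level in one pass, then fills the decoded array by zipping the flattened bucket order with the input.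
import Mathlib
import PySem

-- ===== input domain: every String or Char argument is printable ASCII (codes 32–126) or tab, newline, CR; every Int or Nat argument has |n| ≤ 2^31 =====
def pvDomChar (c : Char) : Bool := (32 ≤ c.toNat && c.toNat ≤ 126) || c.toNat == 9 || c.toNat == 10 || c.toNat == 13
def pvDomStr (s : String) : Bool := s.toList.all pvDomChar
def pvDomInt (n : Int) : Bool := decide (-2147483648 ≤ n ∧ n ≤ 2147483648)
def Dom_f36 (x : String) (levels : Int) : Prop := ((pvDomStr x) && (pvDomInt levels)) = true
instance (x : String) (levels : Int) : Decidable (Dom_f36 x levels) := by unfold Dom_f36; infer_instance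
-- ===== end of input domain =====

-- B replaces A's level-state simulation and its levels-many full rescans of the pattern array
-- by a closed-form level formula and one bucketing pass (objective: faster).

-- ===== PORT A =====
-- one iteration of A's first loop: pattern[i] = level; level += direction; maybe flip direction
def f36_patStep (levels : Int) (st : List Int × Int × Int) (i : Int) : List Int × Int × Int :=
  let pat := st.1.set i.toNat st.2.1          -- pattern[i] = level (0 ≤ i < len here, so exact)
  let level := st.2.1 + st.2.2
  let direction := if level = 0 ∨ level = levels - 1 then -st.2.2 else st.2.2
  (pat, level, direction)

-- one iteration of A's inner decode loop: if pattern[i] == l: decoded[i] = x[index]; index += 1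
-- (x[index] ported as xs.getD: index < len(x) whenever the branch is taken, so exact)
def f36_decStep (xs : List Char) (pattern : List Int) (l : Int)
    (st : List (List Char) × Nat) (i : Int) : List (List Char) × Nat :=
  if PySem.List.pyGetD pattern i 0 = l then (st.1.set i.toNat [xs.getD st.2 ' '], st.2 + 1)
  else st

def f36 (x : String) (levels : Int) : String :=
  let xs := x.toList
  if levels ≤ 1 ∨ levels ≥ (xs.length : Int) then x
  else
    let st1 := (PySem.List.pyRange 0 (xs.length : Int) 1).foldl (f36_patStep levels)
      (List.replicate xs.length 0, 0, 1)
    let pattern := st1.1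
    let st2 := (PySem.List.pyRange 0 levels 1).foldl
      (fun st l => (PySem.List.pyRange 0 (xs.length : Int) 1).foldl
        (f36_decStep xs pattern l) st)
      (List.replicate xs.length [], 0)
    String.ofList st2.1.flatten               -- ''.join(decoded), entries [] or [c]

-- ===== PORT B =====
-- buckets[r if r < levels else p - r].append(i)
def f36_bucketStep (L p : Nat) (bs : List (List Nat)) (i : Nat) : List (List Nat) :=
  let r := i % p
  bs.modify (if r < L then r else p - r) (fun b => b ++ [i])

def f36_alt (x : String) (levels : Int) : String :=
  let xs := x.toList
  let n := xs.length
  if levels ≤ 1 ∨ levels ≥ (n : Int) then x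
  else
    let L := levels.toNat                     -- 2 ≤ levels here, so exact
    let p := 2 * (L - 1)
    let buckets := (List.range n).foldl (f36_bucketStep L p) (List.replicate L [])
    let order := buckets.flatten              -- [i for b in buckets for i in b]
    let decoded := (order.zip xs).foldl (fun d pc => d.set pc.1 [pc.2])
      (List.replicate n [])
    String.ofList decoded.flatten             -- ''.join(decoded)

-- ===== PRECONDITION & SPEC =====
def Spec_f36 (x : String) (levels : Int) (out : String) : Prop := out = f36_alt x levels
instance (x : String) (levels : Int) (out : String) : Decidable (Spec_f36 x levels out) := by unfold Spec_f36; infer_instance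

-- ===== CLAIM (what is proved, stated in full; the proofs are below) =====
def Claim_equal_f36 : Prop := ∀ (x : String) (levels : Int), Dom_f36 x levels → Spec_f36 x levels (f36 x levels)

-- ===== LEMMAS AND PROOFS =====

-- closed-form zigzag level of position i for L levels (period p = 2*(L-1))
def zig (L i : Nat) : Nat :=
  if i % (2 * (L - 1)) < L then i % (2 * (L - 1)) else 2 * (L - 1) - i % (2 * (L - 1))

-- direction A's simulation holds after i iterations
def zdir (L i : Nat) : Int := if i % (2 * (L - 1)) < L - 1 then 1 else -1

-- the order in which A consumes input characters: positions grouped by level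
def orderL (L n : Nat) : List Nat :=
  (List.range L).flatMap (fun l => (List.range n).filter (fun i => decide (zig L i = l)))

lemma zig_lt (L i : Nat) (hL : 2 ≤ L) : zig L i < L := by
  unfold zig
  have hp : 0 < 2 * (L - 1) := by omega
  have := Nat.mod_lt i hp
  split <;> omega

lemma mod_succ (p i : Nat) (hp : 0 < p) :
    (i + 1) % p = if i % p + 1 = p then 0 else i % p + 1 := by
  conv_lhs => rw [← Nat.mod_add_mod]
  by_cases h : i % p + 1 = p
  · simp [h]
  · rw [if_neg h]; exact Nat.mod_eq_of_lt (by have := Nat.mod_lt i hp; omega)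

lemma zig_succ (L i : Nat) (hL : 2 ≤ L) :
    (zig L (i + 1) : Int) = (zig L i : Int) + zdir L i := by
  have hp : 0 < 2 * (L - 1) := by omega
  have hm := Nat.mod_lt i hp
  rw [zig, zig, zdir, mod_succ _ _ hp]
  generalize i % (2 * (L - 1)) = r at *
  split_ifs <;> push_cast <;> omega

lemma zdir_succ (L i : Nat) (hL : 2 ≤ L) :
    zdir L (i + 1) =
      if (zig L (i + 1) : Int) = 0 ∨ (zig L (i + 1) : Int) = (L : Int) - 1
      then -(zdir L i) else zdir L i := by
  have hp : 0 < 2 * (L - 1) := by omega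
  have hm := Nat.mod_lt i hp
  have hm2 := Nat.mod_lt (i + 1) hp
  rw [zig, zdir, zdir, mod_succ _ _ hp]
  generalize i % (2 * (L - 1)) = r at *
  split_ifs <;> push_cast <;> omega

lemma set_map_range {α : Type} (n k : Nat) (g : Nat → α) (v : α) (hk : k < n) :
    ((List.range n).map g).set k v
      = (List.range n).map (fun i => if i = k then v else g i) := by
  apply List.ext_getElem
  · simp
  · intro i h1 h2
    simp only [List.getElem_set, List.getElem_map, List.getElem_range]
    rcases eq_or_ne i k with h | h
    · subst h; simp
    · rw [if_neg (fun hh : k = i => h hh.symm), if_neg h]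

-- invariant of A's first loop
lemma patA_inv (L n k : Nat) (hL : 2 ≤ L) (hk : k ≤ n) :
    ((List.range k).map (Nat.cast : Nat → Int)).foldl (f36_patStep (L : Int))
        (List.replicate n 0, 0, 1)
      = ((List.range n).map (fun i => if i < k then (zig L i : Int) else 0),
         (zig L k : Int), zdir L k) := by
  induction k with
  | zero =>
      simp only [List.range_zero, List.map_nil, List.foldl_nil]
      refine Prod.ext ?_ (Prod.ext ?_ ?_)
      · simp
      · simp [zig]; omega
      · simp only [zdir, Nat.zero_mod]; rw [if_pos (by omega)]
  | succ m ih =>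
      have hm : m ≤ n := by omega
      rw [List.range_succ, List.map_append, List.foldl_append, ih hm]
      simp only [List.map_cons, List.map_nil, List.foldl_cons, List.foldl_nil]
      unfold f36_patStep
      simp only [Int.toNat_natCast]
      refine Prod.ext ?_ (Prod.ext ?_ ?_)
      · simp only []
        rw [set_map_range n m _ _ (by omega)]
        apply List.map_congr_left
        intro i hi
        simp only [List.mem_range] at hi
        by_cases h1 : i = m
        · subst h1; simp
        · by_cases h2 : i < m <;> simp [h1, h2] <;> omega
      · simp only []
        rw [← zig_succ L m hL]
      · simp only []
        rw [← zig_succ L m hL, zdir_succ L m hL]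

lemma patA_final (L n : Nat) (hL : 2 ≤ L) :
    (((List.range n).map (Nat.cast : Nat → Int)).foldl (f36_patStep (L : Int))
        (List.replicate n 0, 0, 1)).1
      = (List.range n).map (fun i => (zig L i : Int)) := by
  rw [patA_inv L n n hL le_rfl]
  apply List.map_congr_left
  intro i hi
  rw [List.mem_range] at hi
  rw [if_pos hi]

lemma count_flatMap {α β : Type} [DecidableEq β] (f : α → List β) (l : List α) (b : β) :
    (l.flatMap f).count b = (l.map (fun a => (f a).count b)).sum := by
  induction l with
  | nil => simp
  | cons a t ih => simp [List.count_append, ih]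

lemma sum_ite_range (L l0 c : Nat) :
    ((List.range L).map (fun l => if l0 = l then c else 0)).sum
      = if l0 < L then c else 0 := by
  induction L with
  | zero => simp
  | succ m ih =>
      rw [List.range_succ, List.map_append, List.sum_append, ih]
      simp only [List.map_cons, List.map_nil, List.sum_cons, List.sum_nil]
      split_ifs <;> omega

lemma orderL_perm (L n : Nat) (hL : 2 ≤ L) : (orderL L n).Perm (List.range n) := by
  rw [List.perm_iff_count]
  intro a
  rw [orderL, count_flatMap]
  have hcongr : ((List.range L).map
      (fun l => ((List.range n).filter (fun i => decide (zig L i = l))).count a))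
      = (List.range L).map (fun l => if zig L a = l then (List.range n).count a else 0) := by
    apply List.map_congr_left
    intro l _
    by_cases h : zig L a = l
    · rw [if_pos h, List.count_filter (by simp [h])]
    · rw [if_neg h, List.count_eq_zero.2]
      intro hmem
      exact h (by simpa using (List.mem_filter.1 hmem).2)
  rw [hcongr, sum_ite_range, if_pos (zig_lt L a hL)]

lemma orderL_length (L n : Nat) (hL : 2 ≤ L) : (orderL L n).length = n :=
  (orderL_perm L n hL).length_eq.trans List.length_range

lemma modify_map_range {α : Type} (L j : Nat) (f : Nat → α) (g : α → α) (hj : j < L) :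
    (((List.range L).map f).modify j g)
      = (List.range L).map (fun l => if l = j then g (f l) else f l) := by
  apply List.ext_getElem
  · simp
  · intro i h1 h2
    simp only [List.getElem_modify, List.getElem_map, List.getElem_range]
    rcases eq_or_ne i j with h | h
    · subst h; simp
    · rw [if_neg (fun hh : j = i => h hh.symm), if_neg h]

-- B's buckets are exactly the level fibers, in order
lemma buckets_inv (L n : Nat) (hL : 2 ≤ L) :
    (List.range n).foldl (f36_bucketStep L (2 * (L - 1))) (List.replicate L [])
      = (List.range L).map (fun l => (List.range n).filter (fun i => decide (zig L i = l))) := by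
  induction n with
  | zero => simp
  | succ m ih =>
      rw [List.range_succ, List.foldl_append, ih]
      simp only [List.foldl_cons, List.foldl_nil]
      unfold f36_bucketStep
      simp only []
      have hz : (if m % (2 * (L - 1)) < L then m % (2 * (L - 1))
          else 2 * (L - 1) - m % (2 * (L - 1))) = zig L m := rfl
      rw [hz, modify_map_range L (zig L m) _ _ (zig_lt L m hL)]
      apply List.map_congr_left
      intro l _
      rcases eq_or_ne l (zig L m) with h | h
      · subst h; simp [List.filter_append]
      · simp only [List.filter_append, if_neg h]
        have : (List.filter (fun i => decide (zig L i = l)) [m]) = [] := by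
          simp
          exact fun hh => h hh.symm
        rw [this, List.append_nil]

-- consuming xs by zip equals consuming it through an index counter
lemma zip_fold_eq (xs : List Char) (os : List Nat) (j : Nat) (d : List (List Char))
    (h : j + os.length ≤ xs.length) :
    (os.zip (xs.drop j)).foldl (fun d pc => d.set pc.1 [pc.2]) d
      = (os.foldl (fun st i => (st.1.set i [xs.getD st.2 ' '], st.2 + 1)) (d, j)).1 := by
  induction os generalizing j d with
  | nil => simp
  | cons o os ih =>
      have hj : j < xs.length := by simp at h; omega
      rw [← List.getElem_cons_drop hj]
      simp only [List.zip_cons_cons, List.foldl_cons]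
      have hg : xs.getD j ' ' = xs[j] := List.getD_eq_getElem xs ' ' hj
      rw [hg]
      exact ih (j + 1) _ (by simp at h ⊢; omega)

lemma foldl_flatMap_eq {α β σ : Type} (P : α → List β) (g : σ → β → σ) (l : List α) (init : σ) :
    (l.flatMap P).foldl g init = l.foldl (fun st a => (P a).foldl g st) init := by
  induction l generalizing init with
  | nil => simp
  | cons a t ih => simp [List.foldl_append, ih]

-- A's nested decode loops fold the assignment over orderL
lemma decA_eq (L n : Nat) (xs : List Char) :
    ((List.range L).map (Nat.cast : Nat → Int)).foldl
        (fun st l => (((List.range n).map (Nat.cast : Nat → Int)).foldl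
          (f36_decStep xs ((List.range n).map (fun i => (zig L i : Int))) l) st))
        (List.replicate n [], 0)
      = (orderL L n).foldl
          (fun st i => (st.1.set i [xs.getD st.2 ' '], st.2 + 1))
          (List.replicate n [], 0) := by
  rw [orderL, foldl_flatMap_eq, List.foldl_map]
  apply PySem.List.foldl_congr_mem
  intro st l _
  rw [List.foldl_map]
  have hcongr : ∀ (st' : List (List Char) × Nat) (i : Nat), i ∈ List.range n →
      f36_decStep xs ((List.range n).map (fun i => (zig L i : Int))) (l : Int) st' (i : Nat) =
        if zig L i = l then (st'.1.set i [xs.getD st'.2 ' '], st'.2 + 1) else st' := by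
    intro st' i hi
    rw [List.mem_range] at hi
    unfold f36_decStep
    have h1 : PySem.List.pyGetD ((List.range n).map (fun i => (zig L i : Int))) (i : Int) 0
        = (zig L i : Int) := by
      rw [PySem.List.pyGetD_natCast, List.getD_eq_getElem _ _ (by simpa using hi)]
      simp
    rw [h1, Int.toNat_natCast]
    by_cases h : zig L i = l
    · rw [if_pos (by exact_mod_cast h), if_pos h]
    · rw [if_neg (by exact_mod_cast h), if_neg h]
  refine (PySem.List.foldl_congr_mem _ _ _ _ hcongr).trans ?_
  apply PySem.List.foldl_ite_eq_foldl_filter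

-- ===== VERDICT (by name: the statement is the Claim_ definition above) =====
theorem f36_spec : Claim_equal_f36 := by
  intro x levels _
  unfold Spec_f36
  simp only [f36, f36_alt]
  by_cases h : levels ≤ 1 ∨ levels ≥ ((x.toList).length : Int)
  · rw [if_pos h, if_pos h]
  · rw [if_neg h, if_neg h]
    rw [not_or] at h
    obtain ⟨h1, h2⟩ := h
    have hL : 2 ≤ levels.toNat := by omega
    have hcast : ((levels.toNat : Nat) : Int) = levels := by omega
    have hn : levels.toNat < x.toList.length := by omega
    rw [← hcast]
    simp only [Int.toNat_natCast]
    rw [PySem.List.pyRange_zero_nat, PySem.List.pyRange_zero_nat]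
    rw [patA_final _ _ hL]
    rw [decA_eq]
    rw [buckets_inv _ _ hL]
    rw [← List.flatMap_def]
    have hzip := zip_fold_eq x.toList (orderL levels.toNat x.toList.length) 0
      (List.replicate x.toList.length [])
      (by rw [orderL_length _ _ hL]; omega)
    rw [List.drop_zero] at hzip
    unfold orderL at hzip
    unfold orderL
    rw [hzip]
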